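-- pv_equiv track=rewrite | github.com/Arushi1088/Craftbug_Agentic_System | ado_excel_css_consolidation.py | consolidate_css_bugs
-- ===== SOURCE A (Python) =====
-- def consolidate_css_bugs(bugs):
--     """Consolidate bugs into CSS categories"""
--
--     css_categories = {
--         'Color & Contrast': [],
--         'Spacing & Layout': [],
--         'Typography': [],
--         'Border & Radius': [],
--         'Shadow & Elevation': [],
--         'Animation & Performance': [],
--         'Alignment & Positioning': [],
--         'Design System Violations': []
--     }
--
--     for bug in bugs:
--         title = bug.get('title', '').lower()
--         description = bug.get('description', '').lower()
--         tags = bug.get('tags', '').lower()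
--
--         # Categorize based on content
--         if any(word in title or word in description for word in ['color', 'contrast', 'palette', 'hex']):
--             css_categories['Color & Contrast'].append(bug)
--         elif any(word in title or word in description for word in ['spacing', 'padding', 'margin', 'gap', 'rhythm']):
--             css_categories['Spacing & Layout'].append(bug)
--         elif any(word in title or word in description for word in ['font', 'typography', 'text', 'size']):
--             css_categories['Typography'].append(bug)
--         elif any(word in title or word in description for word in ['border', 'radius', 'rounded']):
--             css_categories['Border & Radius'].append(bug)
--         elif any(word in title or word in description for word in ['shadow', 'elevation', 'surface']):
--             css_categories['Shadow & Elevation'].append(bug)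
--         elif any(word in title or word in description for word in ['animation', 'transition', 'loading', 'smooth']):
--             css_categories['Animation & Performance'].append(bug)
--         elif any(word in title or word in description for word in ['align', 'position', 'misaligned']):
--             css_categories['Alignment & Positioning'].append(bug)
--         elif any(word in title or word in description for word in ['design system', 'inconsistent', 'standard']):
--             css_categories['Design System Violations'].append(bug)
--
--     return css_categories
-- ===== SOURCE B (Python) =====
-- CSS_CATEGORIES = [
--     ("Color & Contrast", ["color", "contrast", "palette", "hex"]),
--     ("Spacing & Layout", ["spacing", "padding", "margin", "gap", "rhythm"]),
--     ("Typography", ["font", "typography", "text", "size"]),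
--     ("Border & Radius", ["border", "radius", "rounded"]),
--     ("Shadow & Elevation", ["shadow", "elevation", "surface"]),
--     ("Animation & Performance", ["animation", "transition", "loading", "smooth"]),
--     ("Alignment & Positioning", ["align", "position", "misaligned"]),
--     ("Design System Violations", ["design system", "inconsistent", "standard"]),
-- ]
--
--
-- def _label(bug):
--     """Index of the first category whose keywords occur in the bug, else None."""
--     title = bug.get('title', '').lower()
--     description = bug.get('description', '').lower()
--     return next((i for i, (_, words) in enumerate(CSS_CATEGORIES)
--                  if any(w in title or w in description for w in words)), None)
--
--
-- def consolidate_css_bugs(bugs):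
--     """Consolidate bugs into CSS categories: classify every bug once, then
--     build the result category-by-category by grouping on the labels."""
--     labels = [_label(bug) for bug in bugs]
--     return {name: [bug for bug, lab in zip(bugs, labels) if lab == i]
--             for i, (name, _) in enumerate(CSS_CATEGORIES)}
-- ===== Notes on version B (the rewrite author's own statement) =====
-- stated objective: alternative
-- what changed: Instead of A's single pass that runs an eight-branch if/elif cascade per bug and appends into a mutable dict, B classifies each bug once into an optional category index (_label) and then builds the result with the loops swapped: for each category it groups the bugs whose label equals that index, so the output is constructed category-by-category from the precomputed labels.
import Mathlib
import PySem

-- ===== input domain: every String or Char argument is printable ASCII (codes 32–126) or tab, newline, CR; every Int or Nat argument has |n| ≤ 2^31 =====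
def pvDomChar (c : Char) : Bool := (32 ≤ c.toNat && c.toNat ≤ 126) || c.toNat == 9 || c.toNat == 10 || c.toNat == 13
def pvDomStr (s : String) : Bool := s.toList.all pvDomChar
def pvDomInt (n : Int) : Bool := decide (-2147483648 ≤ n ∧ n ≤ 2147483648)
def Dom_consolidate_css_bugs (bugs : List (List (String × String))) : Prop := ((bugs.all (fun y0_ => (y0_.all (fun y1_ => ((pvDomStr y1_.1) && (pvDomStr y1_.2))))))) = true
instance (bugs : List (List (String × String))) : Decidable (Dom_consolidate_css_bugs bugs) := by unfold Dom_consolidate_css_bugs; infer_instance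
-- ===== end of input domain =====

-- B classifies each bug once (index of its first matching category, or none) and then builds the
-- result category-by-category by grouping on those labels, instead of A's per-bug if/elif cascade
-- appending into a mutable dict (objective: alternative decomposition, same cost).

-- ===== PORT A =====
-- loop body of A's for-loop: the if/elif chain, branches in source order;
-- css_categories[name].append(bug) on an always-present key = Dict.modify name [] (· ++ [bug])
def pvStepA (css_categories : PySem.Dict String (List (List (String × String))))
    (bug : List (String × String)) : PySem.Dict String (List (List (String × String))) :=
  let title := PySem.Str.lower ((PySem.Dict.mk bug).getD "title" "")
  let description := PySem.Str.lower ((PySem.Dict.mk bug).getD "description" "")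
  let _tags := PySem.Str.lower ((PySem.Dict.mk bug).getD "tags" "")
  if ["color", "contrast", "palette", "hex"].any
      (fun word => PySem.Str.isIn word title || PySem.Str.isIn word description) then
    css_categories.modify "Color & Contrast" [] (· ++ [bug])
  else if ["spacing", "padding", "margin", "gap", "rhythm"].any
      (fun word => PySem.Str.isIn word title || PySem.Str.isIn word description) then
    css_categories.modify "Spacing & Layout" [] (· ++ [bug])
  else if ["font", "typography", "text", "size"].any
      (fun word => PySem.Str.isIn word title || PySem.Str.isIn word description) then
    css_categories.modify "Typography" [] (· ++ [bug])
  else if ["border", "radius", "rounded"].any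
      (fun word => PySem.Str.isIn word title || PySem.Str.isIn word description) then
    css_categories.modify "Border & Radius" [] (· ++ [bug])
  else if ["shadow", "elevation", "surface"].any
      (fun word => PySem.Str.isIn word title || PySem.Str.isIn word description) then
    css_categories.modify "Shadow & Elevation" [] (· ++ [bug])
  else if ["animation", "transition", "loading", "smooth"].any
      (fun word => PySem.Str.isIn word title || PySem.Str.isIn word description) then
    css_categories.modify "Animation & Performance" [] (· ++ [bug])
  else if ["align", "position", "misaligned"].any
      (fun word => PySem.Str.isIn word title || PySem.Str.isIn word description) then
    css_categories.modify "Alignment & Positioning" [] (· ++ [bug])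
  else if ["design system", "inconsistent", "standard"].any
      (fun word => PySem.Str.isIn word title || PySem.Str.isIn word description) then
    css_categories.modify "Design System Violations" [] (· ++ [bug])
  else
    css_categories

def consolidate_css_bugs (bugs : List (List (String × String))) :
    List (String × List (List (String × String))) :=
  let css_categories : PySem.Dict String (List (List (String × String))) :=
    PySem.Dict.mk
      [("Color & Contrast", []), ("Spacing & Layout", []), ("Typography", []),
       ("Border & Radius", []), ("Shadow & Elevation", []), ("Animation & Performance", []),
       ("Alignment & Positioning", []), ("Design System Violations", [])]
  (bugs.foldl pvStepA css_categories).items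

-- ===== PORT B =====
-- the module-level table CSS_CATEGORIES of Source B
def pvCssTable : List (String × List String) :=
  [("Color & Contrast", ["color", "contrast", "palette", "hex"]),
   ("Spacing & Layout", ["spacing", "padding", "margin", "gap", "rhythm"]),
   ("Typography", ["font", "typography", "text", "size"]),
   ("Border & Radius", ["border", "radius", "rounded"]),
   ("Shadow & Elevation", ["shadow", "elevation", "surface"]),
   ("Animation & Performance", ["animation", "transition", "loading", "smooth"]),
   ("Alignment & Positioning", ["align", "position", "misaligned"]),
   ("Design System Violations", ["design system", "inconsistent", "standard"])]

-- Source B's _label: index of the first matching category, or none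
def pvLabel (bug : List (String × String)) : Option Int :=
  let title := PySem.Str.lower ((PySem.Dict.mk bug).getD "title" "")
  let description := PySem.Str.lower ((PySem.Dict.mk bug).getD "description" "")
  (pvCssTable.findIdx?
    (fun c => c.2.any (fun w => PySem.Str.isIn w title || PySem.Str.isIn w description))).map
    (fun i => (i : Int))

def consolidate_css_bugs_alt (bugs : List (List (String × String))) :
    List (String × List (List (String × String))) :=
  let labels := bugs.map pvLabel
  (PySem.List.enumerate pvCssTable).map
    (fun ic => (ic.2.1,
      ((bugs.zip labels).filter (fun p => p.2 == some ic.1)).map Prod.fst))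

-- ===== PRECONDITION & SPEC =====
def Spec_consolidate_css_bugs (bugs : List (List (String × String))) (out : List (String × List (List (String × String)))) : Prop := out = consolidate_css_bugs_alt bugs
instance (bugs : List (List (String × String))) (out : List (String × List (List (String × String)))) : Decidable (Spec_consolidate_css_bugs bugs out) := by unfold Spec_consolidate_css_bugs; infer_instance

-- ===== CLAIM (what is proved, stated in full; the proofs are below) =====
def Claim_equal_consolidate_css_bugs : Prop := ∀ (bugs : List (List (String × String))), Dom_consolidate_css_bugs bugs → Spec_consolidate_css_bugs bugs (consolidate_css_bugs bugs)

-- ===== LEMMAS AND PROOFS =====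

-- the group of bugs labelled j, in input order
def pvGroup (j : Int) (l : List (List (String × String))) : List (List (String × String)) :=
  l.filter (fun b => pvLabel b == some j)

-- the whole dict state after processing l, as a literal association list
def pvState (l : List (List (String × String))) : List (String × List (List (String × String))) :=
  [("Color & Contrast", pvGroup 0 l), ("Spacing & Layout", pvGroup 1 l),
   ("Typography", pvGroup 2 l), ("Border & Radius", pvGroup 3 l),
   ("Shadow & Elevation", pvGroup 4 l), ("Animation & Performance", pvGroup 5 l),
   ("Alignment & Positioning", pvGroup 6 l), ("Design System Violations", pvGroup 7 l)]

theorem pvGroup_append (j : Int) (l : List (List (String × String))) (b : List (String × String)) :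
    pvGroup j (l ++ [b]) = pvGroup j l ++ (if pvLabel b == some j then [b] else []) := by
  simp only [pvGroup, List.filter_append]
  by_cases h : (pvLabel b == some j) = true <;> simp [List.filter, h]

-- invariant: A's fold state is exactly the grouped state
theorem pvFold_state (l : List (List (String × String))) :
    l.foldl pvStepA (PySem.Dict.mk
      [("Color & Contrast", []), ("Spacing & Layout", []), ("Typography", []),
       ("Border & Radius", []), ("Shadow & Elevation", []), ("Animation & Performance", []),
       ("Alignment & Positioning", []), ("Design System Violations", [])])
      = PySem.Dict.mk (pvState l) := by
  induction l using List.reverseRecOn with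
  | nil => simp [pvState, pvGroup]
  | append_singleton l b ih =>
    rw [List.foldl_append, ih]
    simp only [List.foldl_cons, List.foldl_nil]
    unfold pvStepA
    by_cases h1 : (["color", "contrast", "palette", "hex"].any fun word => PySem.Str.isIn word (PySem.Str.lower ((PySem.Dict.mk b).getD "title" "")) || PySem.Str.isIn word (PySem.Str.lower ((PySem.Dict.mk b).getD "description" ""))) = true
    · simp only [h1, Bool.false_eq_true, if_false, if_true]
      simp only [pvState, pvGroup_append, pvLabel, pvCssTable, List.findIdx?_cons, h1,
        Bool.false_eq_true, if_false, if_true, PySem.Dict.modify]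
      simp [PySem.Dict.get?, PySem.Dict.insert, PySem.Dict.getD]
    · simp only [Bool.not_eq_true] at h1
      by_cases h2 : (["spacing", "padding", "margin", "gap", "rhythm"].any fun word => PySem.Str.isIn word (PySem.Str.lower ((PySem.Dict.mk b).getD "title" "")) || PySem.Str.isIn word (PySem.Str.lower ((PySem.Dict.mk b).getD "description" ""))) = true
      · simp only [h1, h2, Bool.false_eq_true, if_false, if_true]
        simp only [pvState, pvGroup_append, pvLabel, pvCssTable, List.findIdx?_cons, h1, h2,
          Bool.false_eq_true, if_false, if_true, PySem.Dict.modify]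
        simp [PySem.Dict.get?, PySem.Dict.insert, PySem.Dict.getD]
      · simp only [Bool.not_eq_true] at h2
        by_cases h3 : (["font", "typography", "text", "size"].any fun word => PySem.Str.isIn word (PySem.Str.lower ((PySem.Dict.mk b).getD "title" "")) || PySem.Str.isIn word (PySem.Str.lower ((PySem.Dict.mk b).getD "description" ""))) = true
        · simp only [h1, h2, h3, Bool.false_eq_true, if_false, if_true]
          simp only [pvState, pvGroup_append, pvLabel, pvCssTable, List.findIdx?_cons, h1, h2, h3,
            Bool.false_eq_true, if_false, if_true, PySem.Dict.modify]
          simp [PySem.Dict.get?, PySem.Dict.insert, PySem.Dict.getD]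
        · simp only [Bool.not_eq_true] at h3
          by_cases h4 : (["border", "radius", "rounded"].any fun word => PySem.Str.isIn word (PySem.Str.lower ((PySem.Dict.mk b).getD "title" "")) || PySem.Str.isIn word (PySem.Str.lower ((PySem.Dict.mk b).getD "description" ""))) = true
          · simp only [h1, h2, h3, h4, Bool.false_eq_true, if_false, if_true]
            simp only [pvState, pvGroup_append, pvLabel, pvCssTable, List.findIdx?_cons, h1, h2, h3, h4,
              Bool.false_eq_true, if_false, if_true, PySem.Dict.modify]
            simp [PySem.Dict.get?, PySem.Dict.insert, PySem.Dict.getD]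
          · simp only [Bool.not_eq_true] at h4
            by_cases h5 : (["shadow", "elevation", "surface"].any fun word => PySem.Str.isIn word (PySem.Str.lower ((PySem.Dict.mk b).getD "title" "")) || PySem.Str.isIn word (PySem.Str.lower ((PySem.Dict.mk b).getD "description" ""))) = true
            · simp only [h1, h2, h3, h4, h5, Bool.false_eq_true, if_false, if_true]
              simp only [pvState, pvGroup_append, pvLabel, pvCssTable, List.findIdx?_cons, h1, h2, h3, h4, h5,
                Bool.false_eq_true, if_false, if_true, PySem.Dict.modify]
              simp [PySem.Dict.get?, PySem.Dict.insert, PySem.Dict.getD]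
            · simp only [Bool.not_eq_true] at h5
              by_cases h6 : (["animation", "transition", "loading", "smooth"].any fun word => PySem.Str.isIn word (PySem.Str.lower ((PySem.Dict.mk b).getD "title" "")) || PySem.Str.isIn word (PySem.Str.lower ((PySem.Dict.mk b).getD "description" ""))) = true
              · simp only [h1, h2, h3, h4, h5, h6, Bool.false_eq_true, if_false, if_true]
                simp only [pvState, pvGroup_append, pvLabel, pvCssTable, List.findIdx?_cons, h1, h2, h3, h4, h5, h6,
                  Bool.false_eq_true, if_false, if_true, PySem.Dict.modify]
                simp [PySem.Dict.get?, PySem.Dict.insert, PySem.Dict.getD]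
              · simp only [Bool.not_eq_true] at h6
                by_cases h7 : (["align", "position", "misaligned"].any fun word => PySem.Str.isIn word (PySem.Str.lower ((PySem.Dict.mk b).getD "title" "")) || PySem.Str.isIn word (PySem.Str.lower ((PySem.Dict.mk b).getD "description" ""))) = true
                · simp only [h1, h2, h3, h4, h5, h6, h7, Bool.false_eq_true, if_false, if_true]
                  simp only [pvState, pvGroup_append, pvLabel, pvCssTable, List.findIdx?_cons, h1, h2, h3, h4, h5, h6, h7,
                    Bool.false_eq_true, if_false, if_true, PySem.Dict.modify]
                  simp [PySem.Dict.get?, PySem.Dict.insert, PySem.Dict.getD]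
                · simp only [Bool.not_eq_true] at h7
                  by_cases h8 : (["design system", "inconsistent", "standard"].any fun word => PySem.Str.isIn word (PySem.Str.lower ((PySem.Dict.mk b).getD "title" "")) || PySem.Str.isIn word (PySem.Str.lower ((PySem.Dict.mk b).getD "description" ""))) = true
                  · simp only [h1, h2, h3, h4, h5, h6, h7, h8, Bool.false_eq_true, if_false, if_true]
                    simp only [pvState, pvGroup_append, pvLabel, pvCssTable, List.findIdx?_cons, h1, h2, h3, h4, h5, h6, h7, h8,
                      Bool.false_eq_true, if_false, if_true, PySem.Dict.modify]
                    simp [PySem.Dict.get?, PySem.Dict.insert, PySem.Dict.getD]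
                  · simp only [Bool.not_eq_true] at h8
                    simp only [h1, h2, h3, h4, h5, h6, h7, h8, Bool.false_eq_true, if_false, if_true]
                    simp only [pvState, pvGroup_append, pvLabel, pvCssTable, List.findIdx?_cons, h1, h2, h3, h4, h5, h6, h7, h8,
                      Bool.false_eq_true, if_false, if_true, PySem.Dict.modify]
                    simp [PySem.Dict.get?, PySem.Dict.insert, PySem.Dict.getD]

-- Source B's zip-the-labels-then-filter is the direct filter by label
theorem pvZip_filter (l : List (List (String × String))) (j : Int) :
    ((l.zip (l.map pvLabel)).filter (fun p => p.2 == some j)).map Prod.fst = pvGroup j l := by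
  induction l with
  | nil => simp [pvGroup]
  | cons b l ih =>
    unfold pvGroup at ih ⊢
    simp only [List.map_cons, List.zip_cons_cons, List.filter_cons]
    by_cases h : (pvLabel b == some j) = true
    · simp [h, ih]
    · simp only [Bool.not_eq_true] at h
      simp [h, ih]

-- ===== VERDICT (by name: the statement is the Claim_ definition above) =====
theorem consolidate_css_bugs_spec : Claim_equal_consolidate_css_bugs := by
  intro bugs _
  unfold Spec_consolidate_css_bugs consolidate_css_bugs consolidate_css_bugs_alt
  simp only [pvFold_state, pvZip_filter]
  simp [pvState, PySem.List.enumerate, pvCssTable, pvZip_filter]
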